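-- pv_equiv track=rewrite | github.com/rkdl/algorithm-stuff | candy_crush.py | crush
-- ===== SOURCE A (Python) =====
-- def crush(candy: str) -> str:
--     stack = []
--
--     for letter in candy:
--         stack.append(letter)
--
--         if len(stack) >= 3 and stack[-3] == stack[-2] == stack[-1]:
--             for _ in range(3):
--                 stack.pop()
--
--     return ''.join(stack)
-- ===== SOURCE B (Python) =====
-- def crush(candy: str) -> str:
--     # run-length stack of (char, count); count reaching 3 removes the group
--     stack = []  # list of [char, count], counts stay in {1, 2}
--     for letter in candy:
--         if stack and stack[-1][0] == letter:
--             stack[-1][1] += 1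
--             if stack[-1][1] == 3:
--                 stack.pop()
--         else:
--             stack.append([letter, 1])
--     return ''.join(ch * cnt for ch, cnt in stack)
-- ===== Notes on version B (the rewrite author's own statement) =====
-- stated objective: alternative
-- what changed: B keeps a run-length stack of (char,count) pairs and pops a group when its count reaches 3, instead of pushing raw characters and inspecting stack[-3:] after every push.
import Mathlib
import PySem

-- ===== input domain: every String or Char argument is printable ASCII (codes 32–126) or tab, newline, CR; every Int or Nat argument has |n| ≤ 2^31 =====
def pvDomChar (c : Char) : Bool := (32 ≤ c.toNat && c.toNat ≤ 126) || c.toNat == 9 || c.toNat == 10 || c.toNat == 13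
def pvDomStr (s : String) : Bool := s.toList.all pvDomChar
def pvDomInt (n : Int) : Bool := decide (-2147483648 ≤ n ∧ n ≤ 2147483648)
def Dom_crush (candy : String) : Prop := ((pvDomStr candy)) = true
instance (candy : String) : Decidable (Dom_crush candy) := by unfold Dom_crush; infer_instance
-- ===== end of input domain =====

-- B replaces A's raw character stack + stack[-3:] inspection by a run-length stack of
-- (char,count) pairs popped when a count reaches 3 (alternative decomposition, same cost).


-- ===== PORT A =====
-- the Python stack is kept reversed (top = head); stack[-1],stack[-2],stack[-3] are the
-- first three elements, popping three times drops them
def crushStepA (stack : List Char) (letter : Char) : List Char :=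
  let stack' := letter :: stack
  match stack' with
  | a :: b :: c :: rest => if a = b ∧ b = c then rest else stack'
  | _ => stack'

def crush (candy : String) : String :=
  String.ofList ((candy.toList.foldl crushStepA []).reverse)

-- ===== PORT B =====
-- run-length stack, kept reversed (top = head); count reaching 3 pops the group
def crushStepB (stack : List (Char × Nat)) (letter : Char) : List (Char × Nat) :=
  match stack with
  | (ch, k) :: rest =>
      if ch = letter then
        if k + 1 = 3 then rest else (ch, k + 1) :: rest
      else (letter, 1) :: stack
  | [] => [(letter, 1)]

def crush_alt (candy : String) : String :=
  String.ofList (((candy.toList.foldl crushStepB []).reverse).flatMap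
    (fun p => List.replicate p.2 p.1))

-- ===== PRECONDITION & SPEC =====
def Spec_crush (candy : String) (out : String) : Prop := out = crush_alt candy
instance (candy : String) (out : String) : Decidable (Spec_crush candy out) := by unfold Spec_crush; infer_instance

-- ===== CLAIM (what is proved, stated in full; the proofs are below) =====
def Claim_equal_crush : Prop := ∀ (candy : String), Dom_crush candy → Spec_crush candy (crush candy)

-- ===== LEMMAS AND PROOFS =====

/-- Expansion of the run-length stack into the raw character stack (both reversed). -/
def rleExpand (st : List (Char × Nat)) : List Char :=
  st.flatMap (fun p => List.replicate p.2 p.1)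

/-- Well-formedness of B's stack: every count is 1 or 2, adjacent groups have distinct chars. -/
def rleWF : List (Char × Nat) → Prop
  | [] => True
  | (c, k) :: rest =>
      (k = 1 ∨ k = 2) ∧
      (match rest with
       | [] => True
       | (d, _) :: _ => d ≠ c) ∧ rleWF rest

theorem rleExpand_cons (c : Char) (k : Nat) (rest : List (Char × Nat)) :
    rleExpand ((c, k) :: rest) = List.replicate k c ++ rleExpand rest := by
  simp [rleExpand]

/-- One step: under well-formedness, the two stack transitions correspond. -/
theorem step_corresp (st : List (Char × Nat)) (c : Char) (h : rleWF st) :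
    crushStepA (rleExpand st) c = rleExpand (crushStepB st c) ∧ rleWF (crushStepB st c) := by
  match st with
  | [] =>
      simp [crushStepA, crushStepB, rleExpand, rleWF]
  | (ch, k) :: rest =>
      obtain ⟨hk, hadj, hrest⟩ := h
      by_cases hc : ch = c
      · subst hc
        rcases hk with hk | hk <;> subst hk
        · -- count 1 → 2
          have hB : crushStepB ((ch, 1) :: rest) ch = (ch, 2) :: rest := by
            simp [crushStepB]
          refine ⟨?_, ?_⟩
          · rw [hB, rleExpand_cons, rleExpand_cons]
            match rest, hadj, hrest with
            | [], _, _ => simp [crushStepA, rleExpand, List.replicate]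
            | (d, m) :: rest', hadj, hrest =>
                have hm : m = 1 ∨ m = 2 := hrest.1
                have hne : ¬ ch = d := fun hh => hadj hh.symm
                rcases hm with hm | hm <;> subst hm <;>
                  simp [crushStepA, rleExpand_cons, List.replicate, hne]
          · rw [hB]; exact ⟨Or.inr rfl, hadj, hrest⟩
        · -- count 2 → 3: pop the group
          have hB : crushStepB ((ch, 2) :: rest) ch = rest := by
            simp [crushStepB]
          refine ⟨?_, ?_⟩
          · rw [hB, rleExpand_cons]
            simp [crushStepA, List.replicate]
          · rw [hB]; exact hrest
      · -- different char: push a fresh group of count 1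
        have hcc : ¬ c = ch := fun hh => hc hh.symm
        have hB : crushStepB ((ch, k) :: rest) c = (c, 1) :: (ch, k) :: rest := by
          simp [crushStepB, hc]
        refine ⟨?_, ?_⟩
        · rw [hB, rleExpand_cons, rleExpand_cons, rleExpand_cons]
          rcases hk with hk | hk <;> subst hk
          · cases hE : rleExpand rest <;>
              simp [crushStepA, List.replicate, hcc]
          · simp [crushStepA, List.replicate, hcc]
        · rw [hB]; exact ⟨Or.inl rfl, hc, hk, hadj, hrest⟩

theorem fold_corresp (cs : List Char) :
    ∀ st : List (Char × Nat), rleWF st →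
      cs.foldl crushStepA (rleExpand st) = rleExpand (cs.foldl crushStepB st) := by
  induction cs with
  | nil => intro st _; simp
  | cons c cs ih =>
      intro st h
      obtain ⟨he, hw⟩ := step_corresp st c h
      simp only [List.foldl_cons, he]
      exact ih _ hw

-- ===== VERDICT (by name: the statement is the Claim_ definition above) =====
theorem crush_spec : Claim_equal_crush := by
  intro candy _
  unfold Spec_crush crush crush_alt
  have h := fold_corresp candy.toList [] trivial
  simp only [rleExpand, List.flatMap_nil] at h
  rw [h, List.reverse_flatMap]
  simp [Function.comp_def, List.reverse_replicate]
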